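-- pv_equiv track=rewrite | github.com/james5635/GeekForGeek-Data-Structure-and-Algorithm | hashing/medium/count_pairs_a_plus_b_k/solution.py | count_pairs_no_duplicates
-- ===== SOURCE A (Python) =====
-- from collections import defaultdict
--
-- def count_pairs_no_duplicates(arr, k):
--     """
--     Count unique pairs (unique values, not indices).
--
--     Args:
--         arr: List of integers
--         k: Target sum
--
--     Returns:
--         Count of unique value pairs
--     """
--     if not arr or len(arr) < 2:
--         return 0
--
--     freq = defaultdict(int)
--     for num in arr:
--         freq[num] += 1
--
--     count = 0
--     seen = set()
--
--     for num in freq: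
--         if num in seen:
--             continue
--
--         complement = k - num
--
--         if complement == num:
--             # Same element pairs, need at least 2 occurrences
--             if freq[num] >= 2:
--                 count += 1
--         elif complement in freq and complement not in seen:
--             count += 1
--
--         seen.add(num)
--
--     return count
-- ===== SOURCE B (Python) =====
-- from collections import defaultdict
--
-- def count_pairs_no_duplicates(arr, k):
--     """Count unique value pairs summing to k: double-count ordered complement
--     hits over distinct values and halve, plus a closed-form same-value check."""
--     if len(arr) < 2:
--         return 0
--
--     freq = defaultdict(int)
--     for num in arr:
--         freq[num] += 1
--
--     twice = 0
--     for v in freq: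
--         c = k - v
--         if c != v and c in freq:
--             twice += 1
--
--     same = 1 if k % 2 == 0 and freq.get(k // 2, 0) >= 2 else 0
--     return twice // 2 + same
-- ===== Notes on version B (the rewrite author's own statement) =====
-- stated objective: alternative
-- what changed: B replaces A's seen-set first-occurrence scan over the freq keys by a symmetric double count (each distinct value v with k-v present and k-v != v counts once, then halve) plus a closed-form same-value check on k//2, so no seen set is maintained.
import Mathlib
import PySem

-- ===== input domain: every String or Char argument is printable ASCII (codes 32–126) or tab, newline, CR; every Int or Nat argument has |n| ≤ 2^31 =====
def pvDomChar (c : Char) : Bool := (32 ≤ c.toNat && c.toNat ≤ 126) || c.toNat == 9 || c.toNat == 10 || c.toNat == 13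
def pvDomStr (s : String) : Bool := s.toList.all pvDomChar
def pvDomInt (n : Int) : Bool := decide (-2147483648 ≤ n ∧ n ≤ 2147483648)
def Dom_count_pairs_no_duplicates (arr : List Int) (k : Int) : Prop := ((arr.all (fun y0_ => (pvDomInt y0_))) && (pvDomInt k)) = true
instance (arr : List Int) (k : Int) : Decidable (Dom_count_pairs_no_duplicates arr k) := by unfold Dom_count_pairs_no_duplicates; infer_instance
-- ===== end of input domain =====

-- B counts each unordered distinct-value pair twice over the distinct values and halves,
-- plus a closed-form same-value check, instead of A's seen-set first-occurrence scan
-- (objective: alternative, same O(n) cost).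

-- ===== PORT A =====
def count_pairs_no_duplicates (arr : List Int) (k : Int) : Int :=
  if arr = [] ∨ arr.length < 2 then 0
  else
    -- freq = defaultdict(int); for num in arr: freq[num] += 1
    let freq : PySem.Dict Int Int :=
      arr.foldl (fun d num => d.modify num 0 (· + 1)) PySem.Dict.empty
    -- count = 0; seen = set(); for num in freq: …
    (freq.keys.foldl (fun (st : Int × PySem.Set Int) num =>
        if PySem.Set.contains st.2 num = true then st   -- if num in seen: continue
        else
          ((if k - num = num then
              (if 2 ≤ freq.getD num 0 then st.1 + 1 else st.1)
            else if freq.contains (k - num) = true ∧ PySem.Set.contains st.2 (k - num) = false then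
              st.1 + 1
            else st.1),
           PySem.Set.add st.2 num))                      -- seen.add(num)
      ((0 : Int), (PySem.Set.empty : PySem.Set Int))).1

-- ===== PORT B =====
def count_pairs_no_duplicates_alt (arr : List Int) (k : Int) : Int :=
  if arr.length < 2 then 0
  else
    let freq : PySem.Dict Int Int :=
      arr.foldl (fun d num => d.modify num 0 (· + 1)) PySem.Dict.empty
    -- twice = 0; for v in freq: if k-v != v and k-v in freq: twice += 1
    let twice : Int :=
      freq.keys.foldl (fun t v =>
        if k - v ≠ v ∧ freq.contains (k - v) = true then t + 1 else t) 0
    -- same = 1 if k % 2 == 0 and freq.get(k // 2, 0) >= 2 else 0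
    let same : Int :=
      if PySem.Int.mod k 2 = 0 ∧ 2 ≤ freq.getD (PySem.Int.floordiv k 2) 0 then 1 else 0
    PySem.Int.floordiv twice 2 + same

-- ===== PRECONDITION & SPEC =====
def Spec_count_pairs_no_duplicates (arr : List Int) (k : Int) (out : Int) : Prop := out = count_pairs_no_duplicates_alt arr k
instance (arr : List Int) (k : Int) (out : Int) : Decidable (Spec_count_pairs_no_duplicates arr k out) := by unfold Spec_count_pairs_no_duplicates; infer_instance

-- ===== CLAIM (what is proved, stated in full; the proofs are below) =====
def Claim_equal_count_pairs_no_duplicates : Prop := ∀ (arr : List Int) (k : Int), Dom_count_pairs_no_duplicates arr k → Spec_count_pairs_no_duplicates arr k (count_pairs_no_duplicates arr k)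

-- ===== LEMMAS AND PROOFS =====

-- Same-value contribution of A's loop: values v with k - v = v and count ≥ 2.
def cntS (k : Int) (arr : List Int) : List Int → Int
  | [] => 0
  | v :: r => (if k - v = v ∧ 2 ≤ (arr.count v : Int) then 1 else 0) + cntS k arr r

-- Distinct-pair contribution of A's loop, threading the seen set s.
def cntP (k : Int) (arr : List Int) : List Int → List Int → Int
  | [], _ => 0
  | v :: r, s =>
    (if k - v ≠ v ∧ (k - v) ∈ arr ∧ (k - v) ∉ s then 1 else 0) + cntP k arr r (s ++ [v])

-- B's double count: values v with k - v ≠ v and k - v present.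
def cntT (k : Int) (arr : List Int) : List Int → Int
  | [] => 0
  | v :: r => (if k - v ≠ v ∧ (k - v) ∈ arr then 1 else 0) + cntT k arr r

-- A's fold over the distinct keys, decomposed into the same-value and pair parts.
theorem A_fold (k : Int) (arr : List Int) (L : List Int) (s : List Int) (c : Int)
    (hnd : L.Nodup) (hds : ∀ x ∈ L, x ∉ s) :
    (L.foldl (fun (st : Int × PySem.Set Int) num =>
        if PySem.Set.contains st.2 num = true then st
        else
          ((if k - num = num then
              (if 2 ≤ (PySem.Dict.counter arr).getD num 0 then st.1 + 1 else st.1)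
            else if (PySem.Dict.counter arr).contains (k - num) = true ∧
                PySem.Set.contains st.2 (k - num) = false then st.1 + 1
            else st.1),
           PySem.Set.add st.2 num)) (c, s)).1
      = c + cntS k arr L + cntP k arr L s := by
  induction L generalizing s c with
  | nil => simp [cntS, cntP]
  | cons v r ih =>
    have hv : v ∉ s := hds v (by simp)
    have hcv : PySem.Set.contains s v = false := by
      rcases h : PySem.Set.contains s v with _ | _
      · rfl
      · exact absurd ((PySem.Set.contains_iff s v).1 h) hv
    simp only [List.foldl_cons]
    rw [if_neg (fun hc => hv ((PySem.Set.contains_iff s v).1 hc))]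
    have hadd : PySem.Set.add s v = s ++ [v] := PySem.Set.add_of_not_mem hv
    have hds' : ∀ x ∈ r, x ∉ s ++ [v] := by
      intro x hx
      simp only [List.mem_append, List.mem_singleton]
      rintro (h | rfl)
      · exact hds x (by simp [hx]) h
      · exact (List.nodup_cons.1 hnd).1 hx
    have := ih (s ++ [v])
      ((if k - v = v then
          (if 2 ≤ (PySem.Dict.counter arr).getD v 0 then c + 1 else c)
        else if (PySem.Dict.counter arr).contains (k - v) = true ∧
            PySem.Set.contains s (k - v) = false then c + 1
        else c)) (List.nodup_cons.1 hnd).2 hds'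
    simp only [hadd] at *
    rw [this]
    -- now pure arithmetic on the head contribution
    have hgd : (PySem.Dict.counter arr).getD v 0 = (arr.count v : Int) :=
      PySem.Dict.getD_counter arr v
    have hct : (PySem.Dict.counter arr).contains (k - v) = arr.contains (k - v) :=
      PySem.Dict.contains_counter arr (k - v)
    have hmem : arr.contains (k - v) = true ↔ (k - v) ∈ arr := by
      simp
    have hsv : PySem.Set.contains s (k - v) = false ↔ (k - v) ∉ s := by
      constructor
      · intro h hm
        rw [(PySem.Set.contains_iff s (k - v)).2 hm] at h
        cases h
      · intro h
        rcases hc : PySem.Set.contains s (k - v) with _ | _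
        · rfl
        · exact absurd ((PySem.Set.contains_iff s (k - v)).1 hc) h
    simp only [cntS, cntP, hgd, hct]
    split_ifs <;> first | omega | (exfalso; tauto)

-- B's fold over the distinct keys is cntT.
theorem B_fold (k : Int) (arr : List Int) (L : List Int) (c : Int) :
    (L.foldl (fun t v =>
        if k - v ≠ v ∧ (PySem.Dict.counter arr).contains (k - v) = true then t + 1 else t) c)
      = c + cntT k arr L := by
  induction L generalizing c with
  | nil => simp [cntT]
  | cons v r ih =>
    simp only [List.foldl_cons]
    rw [ih]
    simp only [cntT, PySem.Dict.contains_counter]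
    by_cases h : k - v ≠ v ∧ (k - v) ∈ arr
    · rw [if_pos ⟨h.1, by simp [h.2]⟩, if_pos h]; ring
    · rw [if_neg (fun hc => h ⟨hc.1, by simpa using hc.2⟩), if_neg h]; ring

-- cntP as an indexed sum (seen at step i = s ++ L.take i).
theorem cntP_eq_sum (k : Int) (arr : List Int) (L : List Int) (s : List Int) :
    cntP k arr L s = ∑ i ∈ Finset.range L.length,
      (if (k - L.getD i 0 ≠ L.getD i 0 ∧ (k - L.getD i 0) ∈ arr ∧
            (k - L.getD i 0) ∉ s ∧ (k - L.getD i 0) ∉ L.take i) then (1 : Int) else 0) := by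
  induction L generalizing s with
  | nil => simp [cntP]
  | cons v r ih =>
    simp only [cntP, List.length_cons]
    rw [Finset.sum_range_succ', ih (s ++ [v])]
    have h0 : (if (k - (v :: r).getD 0 0 ≠ (v :: r).getD 0 0 ∧ (k - (v :: r).getD 0 0) ∈ arr ∧
          (k - (v :: r).getD 0 0) ∉ s ∧ (k - (v :: r).getD 0 0) ∉ (v :: r).take 0) then (1 : Int) else 0)
        = (if k - v ≠ v ∧ (k - v) ∈ arr ∧ (k - v) ∉ s then (1 : Int) else 0) := by
      simp
    rw [h0]
    have hsum : ∀ i ∈ Finset.range r.length,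
        (if (k - r.getD i 0 ≠ r.getD i 0 ∧ (k - r.getD i 0) ∈ arr ∧
            (k - r.getD i 0) ∉ s ++ [v] ∧ (k - r.getD i 0) ∉ r.take i) then (1 : Int) else 0)
        = (if (k - (v :: r).getD (i + 1) 0 ≠ (v :: r).getD (i + 1) 0 ∧
            (k - (v :: r).getD (i + 1) 0) ∈ arr ∧
            (k - (v :: r).getD (i + 1) 0) ∉ s ∧
            (k - (v :: r).getD (i + 1) 0) ∉ (v :: r).take (i + 1)) then (1 : Int) else 0) := by
      intro i _
      apply if_congr _ rfl rfl
      simp only [List.getD_cons_succ, List.take_succ_cons, List.mem_cons, List.mem_append]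
      tauto
    rw [Finset.sum_congr rfl hsum]
    ring

-- cntT as an indexed sum.
theorem cntT_eq_sum (k : Int) (arr : List Int) (L : List Int) :
    cntT k arr L = ∑ i ∈ Finset.range L.length,
      (if (k - L.getD i 0 ≠ L.getD i 0 ∧ (k - L.getD i 0) ∈ arr) then (1 : Int) else 0) := by
  induction L with
  | nil => simp [cntT]
  | cons v r ih =>
    simp only [cntT, List.length_cons]
    rw [Finset.sum_range_succ', ih]
    simp only [List.getD_cons_succ, List.getD_cons_zero]
    ring

-- The pairing argument: each unordered distinct-value pair is counted once by cntP
-- (at its first position) and twice by cntT, via the complement-index involution.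
theorem cntT_eq_two_cntP (k : Int) (arr : List Int) (L : List Int)
    (hnd : L.Nodup) (hiff : ∀ x, x ∈ L ↔ x ∈ arr) :
    cntT k arr L = 2 * cntP k arr L [] := by
  classical
  set n := L.length with hn
  set P : ℕ → Prop := fun i => k - L.getD i 0 ≠ L.getD i 0 ∧ (k - L.getD i 0) ∈ arr with hP
  set R : ℕ → Prop := fun i => (k - L.getD i 0) ∉ L.take i with hR
  have hPsum : cntT k arr L = ((Finset.range n).filter P).card := by
    rw [cntT_eq_sum]
    rw [Finset.sum_boole]
  have hPRsum : cntP k arr L [] = ((Finset.range n).filter (fun i => P i ∧ R i)).card := by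
    rw [cntP_eq_sum]
    have : ∀ i ∈ Finset.range n,
        (if (k - L.getD i 0 ≠ L.getD i 0 ∧ (k - L.getD i 0) ∈ arr ∧
            (k - L.getD i 0) ∉ ([] : List Int) ∧ (k - L.getD i 0) ∉ L.take i) then (1 : Int) else 0)
        = (if P i ∧ R i then (1 : Int) else 0) := by
      intro i _
      apply if_congr _ rfl rfl
      simp only [hP, hR, List.not_mem_nil, not_false_iff, true_and]
      tauto
    rw [Finset.sum_congr rfl this, Finset.sum_boole]
  -- basic facts about positions inside P
  have hget : ∀ i (hi : i < L.length), L.getD i 0 = L[i] :=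
    fun i hi => List.getD_eq_getElem L 0 hi
  have hmemL : ∀ i (hi : i < L.length), L.getD i 0 ∈ L := by
    intro i hi; rw [hget i hi]; exact List.getElem_mem _
  set σ : ℕ → ℕ := fun i => L.idxOf (k - L.getD i 0) with hσ
  have key : ∀ i, i < n → P i →
      σ i < n ∧ L.getD (σ i) 0 = k - L.getD i 0 ∧ σ (σ i) = i ∧ P (σ i) ∧ σ i ≠ i := by
    intro i hi hPi
    have hmem : (k - L.getD i 0) ∈ L := (hiff _).2 hPi.2
    have h1 : σ i < n := by
      simpa [hσ, hn] using List.idxOf_lt_length_of_mem hmem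
    have h2 : L.getD (σ i) 0 = k - L.getD i 0 := by
      rw [hget (σ i) h1]
      exact List.getElem_idxOf (by simpa [hn] using h1)
    have h3 : σ (σ i) = i := by
      have h2' : L.getD (List.idxOf (k - L.getD i 0) L) 0 = k - L.getD i 0 := h2
      show List.idxOf (k - L.getD (List.idxOf (k - L.getD i 0) L) 0) L = i
      rw [h2', show k - (k - L.getD i 0) = L.getD i 0 by ring, hget i hi]
      exact hnd.idxOf_getElem i (by omega)
    have h4 : P (σ i) := by
      constructor
      · rw [h2]; intro hc; exact hPi.1 (by linarith [hc])
      · rw [h2, show k - (k - L.getD i 0) = L.getD i 0 by ring]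
        exact (hiff _).1 (hmemL i hi)
    have h5 : σ i ≠ i := by
      intro hc
      apply hPi.1
      have := h2
      rw [hc] at this
      linarith [this]
    exact ⟨h1, h2, h3, h4, h5⟩
  have hRiff : ∀ i, i < n → P i → (R i ↔ i < σ i) := by
    intro i hi hPi
    have hmem : (k - L.getD i 0) ∈ L := (hiff _).2 hPi.2
    have hne := (key i hi hPi).2.2.2.2
    have hσe : σ i = List.idxOf (k - L.getD i 0) L := rfl
    have hmt := List.mem_take_iff_idxOf_lt (n := i) hmem
    constructor
    · intro hRi
      have hlt : ¬ List.idxOf (k - L.getD i 0) L < i := fun hlt => hRi (hmt.2 hlt)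
      omega
    · intro hlt hmemtake
      have := hmt.1 hmemtake
      omega
  -- split filter P by R
  have e1 := Finset.filter_filter P R (Finset.range n)
  have e2 := Finset.filter_filter P (fun i => ¬ R i) (Finset.range n)
  have hsplit := Finset.card_filter_add_card_filter_not (s := (Finset.range n).filter P) R
  rw [e1, e2] at hsplit
  -- bijection between the two halves via σ
  have hbij : ((Finset.range n).filter (fun i => P i ∧ R i)).card
      = ((Finset.range n).filter (fun i => P i ∧ ¬ R i)).card := by
    apply Finset.card_bij' (fun i _ => σ i) (fun i _ => σ i)
    · intro i hi
      simp only [Finset.mem_filter, Finset.mem_range] at hi ⊢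
      obtain ⟨hin, hPi, hRi⟩ := hi
      obtain ⟨h1, h2, h3, h4, h5⟩ := key i hin hPi
      refine ⟨h1, h4, ?_⟩
      rw [hRiff (σ i) h1 h4, h3]
      have := (hRiff i hin hPi).1 hRi
      omega
    · intro i hi
      simp only [Finset.mem_filter, Finset.mem_range] at hi ⊢
      obtain ⟨hin, hPi, hRi⟩ := hi
      obtain ⟨h1, h2, h3, h4, h5⟩ := key i hin hPi
      refine ⟨h1, h4, ?_⟩
      rw [hRiff (σ i) h1 h4, h3]
      rw [hRiff i hin hPi] at hRi
      omega
    · intro i hi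
      simp only [Finset.mem_filter, Finset.mem_range] at hi
      exact (key i hi.1 hi.2.1).2.2.1
    · intro i hi
      simp only [Finset.mem_filter, Finset.mem_range] at hi
      exact (key i hi.1 hi.2.1).2.2.1
  rw [hPsum, hPRsum]
  rw [← hsplit, hbij]
  push_cast
  ring

-- cntS vanishes when no value satisfies the same-value condition.
theorem cntS_zero (k : Int) (arr : List Int) (L : List Int)
    (h : ∀ v ∈ L, ¬ (k - v = v ∧ 2 ≤ (arr.count v : Int))) : cntS k arr L = 0 := by
  induction L with
  | nil => simp [cntS]
  | cons w r ih =>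
    simp only [cntS, if_neg (h w (by simp))]
    rw [ih (fun v hv => h v (List.mem_cons_of_mem w hv))]
    simp

-- cntS in closed form: the unique candidate is k // 2 when k is even.
theorem cntS_closed (k : Int) (arr : List Int) (L : List Int)
    (hnd : L.Nodup) (hiff : ∀ x, x ∈ L ↔ x ∈ arr) :
    cntS k arr L
      = (if PySem.Int.mod k 2 = 0 ∧ 2 ≤ (arr.count (PySem.Int.floordiv k 2) : Int)
         then (1 : Int) else 0) := by
  by_cases h : PySem.Int.mod k 2 = 0 ∧ 2 ≤ (arr.count (PySem.Int.floordiv k 2) : Int)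
  · rw [if_pos h]
    obtain ⟨hmod, hcnt⟩ := h
    have hdvd : (2 : Int) ∣ k := (PySem.Int.mod_eq_zero_iff_dvd k 2).1 hmod
    set v0 := PySem.Int.floordiv k 2 with hv0
    have hfe : v0 = k / 2 := PySem.Int.floordiv_eq_ediv_of_pos (by norm_num)
    have hk2 : k - v0 = v0 := by
      obtain ⟨m, rfl⟩ := hdvd
      rw [hfe, Int.mul_ediv_cancel_left m (by norm_num)]
      ring
    have hv0arr : v0 ∈ arr := by
      have h0 : 0 < arr.count v0 := by
        exact_mod_cast (by omega : (0 : Int) < (arr.count v0 : Int))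
      exact List.count_pos_iff.1 h0
    have huniq : ∀ v : Int, k - v = v → v = v0 := by
      intro v hv; omega
    have hv0L : v0 ∈ L := (hiff v0).2 hv0arr
    clear hmod hv0arr hiff
    induction L with
    | nil => simp at hv0L
    | cons w r ih =>
      have hndr := (List.nodup_cons.1 hnd).2
      have hwr := (List.nodup_cons.1 hnd).1
      rcases List.mem_cons.1 hv0L with rfl | hv0r
      · simp only [cntS, if_pos (show k - v0 = v0 ∧ 2 ≤ (arr.count v0 : Int) from ⟨hk2, hcnt⟩)]
        rw [cntS_zero k arr r (by
          rintro v hv ⟨he, -⟩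
          exact hwr (huniq v he ▸ hv))]
        norm_num
      · simp only [cntS, if_neg (show ¬ (k - w = w ∧ 2 ≤ (arr.count w : Int)) by
          rintro ⟨he, -⟩
          exact hwr ((huniq w he) ▸ hv0r))]
        rw [ih hndr hv0r]
        simp
  · rw [if_neg h]
    apply cntS_zero
    rintro v hv ⟨he, hc⟩
    apply h
    have hdvd : (2 : Int) ∣ k := ⟨v, by omega⟩
    have hfe : PySem.Int.floordiv k 2 = k / 2 :=
      PySem.Int.floordiv_eq_ediv_of_pos (by norm_num)
    have hv0 : PySem.Int.floordiv k 2 = v := by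
      rw [hfe, show k = 2 * v by omega, Int.mul_ediv_cancel_left v (by norm_num)]
    exact ⟨(PySem.Int.mod_eq_zero_iff_dvd k 2).2 hdvd, by rw [hv0]; exact hc⟩

-- ===== VERDICT (by name: the statement is the Claim_ definition above) =====
theorem count_pairs_no_duplicates_spec : Claim_equal_count_pairs_no_duplicates := by
  intro arr k _
  unfold Spec_count_pairs_no_duplicates
  simp only [count_pairs_no_duplicates, count_pairs_no_duplicates_alt]
  by_cases hlen : arr.length < 2
  · rw [if_pos (Or.inr hlen), if_pos hlen]
  · rw [if_neg (by
        rintro (rfl | h)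
        · exact hlen (by simp)
        · exact hlen h), if_neg hlen]
    rw [← PySem.Dict.counter_eq_foldl]
    set L := (PySem.Dict.counter arr).keys with hL
    have hLof : L = PySem.Set.ofList arr := PySem.Dict.keys_counter arr
    have hnd : L.Nodup := by rw [hLof]; exact PySem.Set.nodup_ofList arr
    have hiff : ∀ x, x ∈ L ↔ x ∈ arr := by
      intro x; rw [hLof]; exact PySem.Set.mem_ofList arr x
    rw [show (PySem.Set.empty : PySem.Set Int) = ([] : List Int) from rfl]
    rw [A_fold k arr L [] 0 hnd (by simp)]
    rw [B_fold k arr L 0]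
    rw [cntT_eq_two_cntP k arr L hnd hiff, cntS_closed k arr L hnd hiff]
    have h2 : PySem.Int.floordiv (0 + 2 * cntP k arr L []) 2 = cntP k arr L [] := by
      rw [PySem.Int.floordiv_eq_ediv_of_pos (by norm_num)]
      rw [zero_add, Int.mul_ediv_cancel_left _ (by norm_num)]
    rw [h2]
    simp only [PySem.Dict.getD_counter]
    ring
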